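-- pv_equiv track=rewrite | github.com/pypi-data/pypi-mirror-356 | packages/aindex2/aindex2-1.4.4-cp38-cp38-macosx_11_0_arm64.whl/aindex/core/aindex.py | _index_to_13mer
-- ===== SOURCE A (Python) =====
-- def _index_to_13mer(index: int) -> str:
--     """
--     Convert index to 13-mer string
--
--     Args:
--         index: Index in the range [0, 4^13-1]
--
--     Returns:
--         13-mer string
--     """
--     nucleotides = ['A', 'C', 'G', 'T']
--     kmer = []
--     temp_index = index
--
--     for i in range(13):
--         kmer.append(nucleotides[temp_index % 4])
--         temp_index //= 4
--
--     return ''.join(reversed(kmer))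
-- ===== SOURCE B (Python) =====
-- def _index_to_13mer(index: int) -> str:
--     """Convert index to 13-mer string (most-significant digit first, no reversal)."""
--     nucleotides = 'ACGT'
--     return ''.join(nucleotides[(index // 4 ** (12 - p)) % 4] for p in range(13))
-- ===== Notes on version B (the rewrite author's own statement) =====
-- stated objective: idiomatic
-- what changed: B emits the k-mer most-significant-digit-first, computing each position's base-four digit directly by a floor-division/modulo formula inside one join, instead of A's mutable-accumulator loop that collects low digits and then reverses them.
import Mathlib
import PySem

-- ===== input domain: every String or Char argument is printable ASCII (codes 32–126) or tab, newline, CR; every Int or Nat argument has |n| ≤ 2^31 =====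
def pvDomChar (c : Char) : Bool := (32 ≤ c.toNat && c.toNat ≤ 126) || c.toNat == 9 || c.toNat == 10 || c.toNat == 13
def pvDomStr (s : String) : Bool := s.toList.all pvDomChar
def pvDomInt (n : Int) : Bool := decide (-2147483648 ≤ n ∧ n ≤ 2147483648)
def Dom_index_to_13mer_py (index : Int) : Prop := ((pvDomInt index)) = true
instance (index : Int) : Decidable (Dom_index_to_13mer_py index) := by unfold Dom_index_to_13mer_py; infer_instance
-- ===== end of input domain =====

-- B builds the 13-mer most-significant-digit-first via the direct digit formula
-- (index // 4**(12-p)) % 4 in one join, replacing A's accumulate-then-reverse loop (idiomatic rewrite).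


-- ===== PORT A =====
-- A: collect low base-4 digits while dividing temp_index by 4, then join the reversed list.
def index_to_13mer_py (index : Int) : String :=
  let nucleotides : List String := ["A", "C", "G", "T"]
  let st := (PySem.List.pyRange 0 13 1).foldl
    (fun (st : List String × Int) _ =>
      (st.1 ++ [(PySem.List.pyGet? nucleotides (PySem.Int.mod st.2 4)).getD ""],
       PySem.Int.floordiv st.2 4))
    ([], index)
  PySem.Str.join "" st.1.reverse

-- ===== PORT B =====
-- B: most-significant digit first, digit p = (index // 4^(12-p)) % 4, joined left to right.
def index_to_13mer_py_alt (index : Int) : String :=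
  let nucleotides : String := "ACGT"
  PySem.Str.join "" ((PySem.List.pyRange 0 13 1).map
    (fun p => String.singleton ((PySem.Str.pyGet? nucleotides
        (PySem.Int.mod (PySem.Int.floordiv index ((4 : Int) ^ ((12 - p).toNat))) 4)).getD ' ')))

-- ===== PRECONDITION & SPEC =====
def Spec_index_to_13mer_py (index : Int) (out : String) : Prop := out = index_to_13mer_py_alt index
instance (index : Int) (out : String) : Decidable (Spec_index_to_13mer_py index out) := by unfold Spec_index_to_13mer_py; infer_instance

-- ===== CLAIM (what is proved, stated in full; the proofs are below) =====
def Claim_equal_index_to_13mer_py : Prop := ∀ (index : Int), Dom_index_to_13mer_py index → Spec_index_to_13mer_py index (index_to_13mer_py index)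

-- ===== LEMMAS AND PROOFS =====

-- the two nucleotide lookups agree on a base-4 digit
theorem lookup_eq (a : Int) :
    (PySem.List.pyGet? ["A", "C", "G", "T"] (PySem.Int.mod a 4)).getD "" =
    String.singleton ((PySem.Str.pyGet? "ACGT" (PySem.Int.mod a 4)).getD ' ') := by
  have h0 : 0 ≤ PySem.Int.mod a 4 := PySem.Int.mod_nonneg a (by norm_num)
  have h4 : PySem.Int.mod a 4 < 4 := PySem.Int.mod_lt a (by norm_num)
  set d := PySem.Int.mod a 4 with hd
  interval_cases d <;> decide

-- dividing again by 4 bumps the power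
theorem div_step (a : Int) (k : Nat) :
    PySem.Int.floordiv (PySem.Int.floordiv a ((4 : Int) ^ k)) 4 =
    PySem.Int.floordiv a ((4 : Int) ^ (k + 1)) := by
  rw [PySem.Int.floordiv_eq_ediv_of_pos (by positivity),
      PySem.Int.floordiv_eq_ediv_of_pos (by norm_num),
      PySem.Int.floordiv_eq_ediv_of_pos (by positivity),
      Int.ediv_ediv_of_nonneg (by positivity), pow_succ]

theorem div_zero_pow (a : Int) : a = PySem.Int.floordiv a ((4 : Int) ^ 0) := by
  rw [pow_zero, PySem.Int.floordiv_eq_ediv_of_pos (by norm_num : (0:Int) < 1), Int.ediv_one]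

-- ===== VERDICT (by name: the statement is the Claim_ definition above) =====
theorem index_to_13mer_py_spec : Claim_equal_index_to_13mer_py := by
  intro index _
  show index_to_13mer_py index = index_to_13mer_py_alt index
  unfold index_to_13mer_py index_to_13mer_py_alt
  simp only [show PySem.List.pyRange 0 13 1 = [0,1,2,3,4,5,6,7,8,9,10,11,12] from by decide,
    List.foldl, List.map, List.reverse]
  rw [show index = PySem.Int.floordiv index ((4:Int)^0) from div_zero_pow index]
  simp only [div_step, lookup_eq]
  norm_num [show Int.toNat 12 = 12 from rfl, show Int.toNat 11 = 11 from rfl,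
    show Int.toNat 10 = 10 from rfl, show Int.toNat 9 = 9 from rfl, show Int.toNat 8 = 8 from rfl,
    show Int.toNat 7 = 7 from rfl, show Int.toNat 6 = 6 from rfl, show Int.toNat 5 = 5 from rfl,
    show Int.toNat 4 = 4 from rfl, show Int.toNat 3 = 3 from rfl, show Int.toNat 2 = 2 from rfl]
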